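-- pv_equiv track=rewrite | github.com/malikelmessiry/recipes-problem | main.py | most_varied
-- ===== SOURCE A (Python) =====
-- def most_varied(recipes):
--     recipe_dict = {}
--
--     for recipe in recipes:
--         if recipe[1] not in recipe_dict:
--             recipe_dict[recipe[1]] = set(recipe[2])
--         else:
--             for item in recipe[2]:
--                 recipe_dict[recipe[1]].add(item)
--
--
--     length_of_ingredients = []
--     for name, ingredients in recipe_dict.items():
--         length_of_ingredients.append(((len(ingredients), name)))
--
--     length_of_ingredients.sort(reverse=True)
--     first_name = length_of_ingredients[0][1]
--     second_name = length_of_ingredients[1][1]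
--
--     first_return = (first_name, sorted(recipe_dict[first_name]))
--     second_return = (second_name, sorted(recipe_dict[second_name]))
--
--
--     return [first_return, second_return]
-- ===== SOURCE B (Python) =====
-- def most_varied(recipes):
--     groups = {}
--     for recipe in recipes:
--         groups.setdefault(recipe[1], set()).update(recipe[2])
--     # single pass keeping the top two (len, name) keys in descending order
--     # instead of building and sorting the full list
--     top = []
--     for name, ingredients in groups.items():
--         key = (len(ingredients), name)
--         if not top or key > top[0]:
--             top = [key] + top[:1]
--         elif len(top) < 2 or key > top[1]:
--             top = [top[0], key]
--     return [(top[0][1], sorted(groups[top[0][1]])),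
--             (top[1][1], sorted(groups[top[1][1]]))]
-- ===== Notes on version B (the rewrite author's own statement) =====
-- stated objective: alternative
-- what changed: Replaces building the full (len, name) list and sorting it with a single pass over the grouping dict that maintains only the top two keys by descending tuple order.
import Mathlib
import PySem

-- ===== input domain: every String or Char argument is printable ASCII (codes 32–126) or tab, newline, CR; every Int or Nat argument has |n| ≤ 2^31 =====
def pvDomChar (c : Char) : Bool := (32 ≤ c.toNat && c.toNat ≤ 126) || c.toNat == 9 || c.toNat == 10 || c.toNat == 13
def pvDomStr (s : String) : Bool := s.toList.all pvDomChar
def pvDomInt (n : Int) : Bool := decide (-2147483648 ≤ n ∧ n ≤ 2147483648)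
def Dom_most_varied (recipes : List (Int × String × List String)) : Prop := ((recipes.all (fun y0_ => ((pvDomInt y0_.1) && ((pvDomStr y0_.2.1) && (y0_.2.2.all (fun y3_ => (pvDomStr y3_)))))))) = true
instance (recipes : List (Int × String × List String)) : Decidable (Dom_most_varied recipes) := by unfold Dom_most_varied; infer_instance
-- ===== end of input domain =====

-- B replaces A's build-list-then-sort step by a one-pass top-two selection over the
-- grouping dict (objective: alternative; equivalence is about the return value).

-- ===== PORT A =====
-- A's in-place 'recipe_dict[name].add(item)' loop is ported as a functional update of
-- the stored set (Dict.modify with the fold of Set.add), exact for the stored value.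
def pvGroupA (d : PySem.Dict String (PySem.Set String)) (r : Int × String × List String) :
    PySem.Dict String (PySem.Set String) :=
  if d.contains r.2.1 then d.modify r.2.1 [] (fun s => r.2.2.foldl PySem.Set.add s)
  else d.insert r.2.1 (PySem.Set.ofList r.2.2)

-- the tail of A: build the (len, name) list, sort it descending, read entries [0] and [1]
def pvPickA (d : PySem.Dict String (PySem.Set String)) : List (String × List String) :=
  match PySem.List.sorted2 (d.items.map (fun p => (p.2.length, p.1)))
      (fun t => t.1) (fun t => t.2) true with
  | f :: s :: _ =>
      [(f.2, PySem.List.sorted (d.getD f.2 []) (fun x => x) false),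
       (s.2, PySem.List.sorted (d.getD s.2 []) (fun x => x) false)]
  | _ => []  -- Python raises IndexError here (fewer than two recipe names): excluded by Pre_

def most_varied (recipes : List (Int × String × List String)) : List (String × List String) :=
  pvPickA (recipes.foldl pvGroupA PySem.Dict.empty)

-- ===== PORT B =====
def pvGroupB (d : PySem.Dict String (PySem.Set String)) (r : Int × String × List String) :
    PySem.Dict String (PySem.Set String) :=
  d.modify r.2.1 [] (fun s => PySem.Set.update s r.2.2)

-- Python tuple comparison 'key > other' on (len, name)
def pvTupGt (a b : Nat × String) : Bool :=
  decide (b.1 < a.1) || (!decide (a.1 < b.1) && decide (b.2 < a.2))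

-- one loop step: 'top' holds at most two keys in descending order (top[0]/top[1] by pattern match)
def pvTop2Step (t : List (Nat × String)) (k : Nat × String) : List (Nat × String) :=
  match t with
  | [] => [k]
  | [y0] => if pvTupGt k y0 then [k, y0] else [y0, k]
  | y0 :: y1 :: _ =>
      if pvTupGt k y0 then [k, y0]
      else if pvTupGt k y1 then [y0, k] else [y0, y1]

-- the tail of B: one pass over the items keeping the top two keys, then top[0]/top[1]
def pvPickB (d : PySem.Dict String (PySem.Set String)) : List (String × List String) :=
  match d.items.foldl (fun t p => pvTop2Step t (p.2.length, p.1)) [] with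
  | f :: s :: _ =>
      [(f.2, PySem.List.sorted (d.getD f.2 []) (fun x => x) false),
       (s.2, PySem.List.sorted (d.getD s.2 []) (fun x => x) false)]
  | _ => []  -- Python raises IndexError here: excluded by Pre_

def most_varied_alt (recipes : List (Int × String × List String)) : List (String × List String) :=
  pvPickB (recipes.foldl pvGroupB PySem.Dict.empty)

-- ===== PRECONDITION & SPEC =====
-- Pre_ excludes exactly the inputs with fewer than two distinct recipe names, on which
-- the Python A raises IndexError (and B raises too).
def Pre_most_varied (recipes : List (Int × String × List String)) : Prop :=
  2 ≤ (PySem.Set.ofList (recipes.map (fun r => r.2.1))).length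
instance (recipes : List (Int × String × List String)) : Decidable (Pre_most_varied recipes) := by
  unfold Pre_most_varied; infer_instance

def pvWitness_most_varied : (List (Int × String × List String)) :=
  [(1, "pasta", ["egg", "flour"]), (2, "salad", ["lettuce"])]

def Spec_most_varied (recipes : List (Int × String × List String)) (out : List (String × List String)) : Prop := out = most_varied_alt recipes
instance (recipes : List (Int × String × List String)) (out : List (String × List String)) : Decidable (Spec_most_varied recipes out) := by unfold Spec_most_varied; infer_instance

-- ===== CLAIM (what is proved, stated in full; the proofs are below) =====
def Claim_equal_most_varied : Prop := ∀ (recipes : List (Int × String × List String)), Dom_most_varied recipes → Pre_most_varied recipes → Spec_most_varied recipes (most_varied recipes)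

-- ===== LEMMAS AND PROOFS =====

theorem pvGroup_eq : pvGroupA = pvGroupB := by
  funext d r
  unfold pvGroupA pvGroupB PySem.Dict.modify
  by_cases h : d.contains r.2.1
  · simp [h, PySem.Set.update]
  · have hg : d.get? r.2.1 = none := by
      simp only [PySem.Dict.contains, List.any_eq_true, beq_iff_eq, Prod.exists,
        exists_and_right, exists_eq_right, not_exists, PySem.Dict.get?,
        Option.map_eq_none_iff, List.find?_eq_none, Prod.forall] at h ⊢
      intro a b hm heq
      exact h b (heq ▸ hm)
    simp [h, PySem.Dict.getD, hg, PySem.Set.update, PySem.Set.ofList_eq_foldl]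

theorem pvSorted2_rev_eq (l : List (Nat × String)) :
    PySem.List.sorted2 l (fun t => t.1) (fun t => t.2) true
      = l.foldl (fun acc x => PySem.List.insertBy pvTupGt x acc) [] := rfl

theorem pvTake2_insertBy (x : Nat × String) (ys : List (Nat × String)) :
    (PySem.List.insertBy pvTupGt x ys).take 2 = pvTop2Step (ys.take 2) x := by
  match ys with
  | [] => rfl
  | [y0] => simp only [PySem.List.insertBy, pvTop2Step]; split_ifs with h <;> simp [h]
  | y0 :: y1 :: t =>
      simp only [PySem.List.insertBy, pvTop2Step, List.take_succ_cons, List.take_zero]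
      split_ifs <;> simp

theorem pvFold_take2 (l : List (Nat × String)) (acc : List (Nat × String)) :
    (l.foldl (fun a x => PySem.List.insertBy pvTupGt x a) acc).take 2
      = l.foldl pvTop2Step (acc.take 2) := by
  induction l generalizing acc with
  | nil => rfl
  | cons x t ih =>
      simp only [List.foldl_cons]
      rw [ih, pvTake2_insertBy]

-- ===== VERDICT (by name: the statement is the Claim_ definition above) =====
theorem most_varied_spec : Claim_equal_most_varied := by
  intro recipes _ _
  unfold Spec_most_varied most_varied most_varied_alt
  rw [pvGroup_eq]
  generalize List.foldl pvGroupB PySem.Dict.empty recipes = d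
  have hfold : d.items.foldl (fun t p => pvTop2Step t (p.2.length, p.1)) []
      = (PySem.List.sorted2 (d.items.map (fun p => (p.2.length, p.1)))
          (fun t => t.1) (fun t => t.2) true).take 2 := by
    rw [pvSorted2_rev_eq, pvFold_take2, ← List.foldl_map]
    rfl
  unfold pvPickA pvPickB
  rw [hfold]
  cases hls : PySem.List.sorted2
      (d.items.map (fun p => (p.2.length, p.1)))
      (fun t => t.1) (fun t => t.2) true with
  | nil => simp
  | cons a tl =>
      cases tl with
      | nil => simp
      | cons b tl2 => simp
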